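-- pv_equiv track=rewrite | github.com/Alex92rus/aoc_2024 | bridge-repair/solution.py | increment_single_trinary
-- ===== SOURCE A (Python) =====
-- def increment_single_trinary(trinary_str):
--     """
--     Increment a single trinary string.
--     Handles carrying over 1s and extending the string if needed.
--     """
--     # Convert trinary string to list of characters for manipulation
--     trinary_chars = list(trinary_str)
--
--     # Start from the rightmost bit
--     carry = 1
--     for i in range(len(trinary_chars) - 1, -1, -1):
--         # Convert current bit to integer and add carry
--         current_bit = int(trinary_chars[i])
--         total = current_bit + carry
--
--         # Update bit and carry
--         trinary_chars[i] = str(total % 3)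
--         carry = total // 3
--
--     # If there's still a carry, prepend 1
--     if carry:
--         trinary_chars.insert(0, '1')
--
--     return ''.join(trinary_chars)
-- ===== SOURCE B (Python) =====
-- def increment_single_trinary(trinary_str):
--     """
--     Increment a single trinary string.
--     Parses the whole value (Horner scheme), adds one, and re-renders it
--     in base 3 at the original width (with a leading '1' on overflow).
--     """
--     value = 0
--     for ch in trinary_str:
--         value = value * 3 + int(ch)
--     value += 1
--     out = []
--     for _ in range(len(trinary_str)):
--         value, r = divmod(value, 3)
--         out.append(str(r))
--     if value:
--         out.append('1')
--     return ''.join(reversed(out))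
-- ===== Notes on version B (the rewrite author's own statement) =====
-- stated objective: alternative
-- what changed: A propagates a carry digit-by-digit right-to-left through the character list; B parses the whole number once with a left-to-right Horner pass, adds 1, and re-renders it in base 3 by repeated divmod at the original width.
import Mathlib
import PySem

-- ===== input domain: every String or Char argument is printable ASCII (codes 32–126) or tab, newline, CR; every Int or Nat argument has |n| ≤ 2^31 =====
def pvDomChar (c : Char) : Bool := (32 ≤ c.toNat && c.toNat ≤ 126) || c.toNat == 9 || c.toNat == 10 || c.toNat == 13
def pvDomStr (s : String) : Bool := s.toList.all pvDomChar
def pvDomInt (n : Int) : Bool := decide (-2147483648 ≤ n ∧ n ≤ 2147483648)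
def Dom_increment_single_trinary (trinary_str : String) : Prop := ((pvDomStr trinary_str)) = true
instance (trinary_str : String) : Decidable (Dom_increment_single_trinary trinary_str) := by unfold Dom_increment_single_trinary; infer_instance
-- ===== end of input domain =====

-- B replaces A's digit-by-digit carry propagation by parse-value / add-one / re-render in base 3 (alternative decomposition, same cost).

-- ===== PORT A =====
-- the for-loop over range(len-1, -1, -1): the carry flows right-to-left, so the
-- recursion processes the tail (the lower digits) first, then the head position.
def pvALoop : List String → Int → List String × Int
  | [], carry => ([], carry)
  | c :: rest, carry =>
    let r := pvALoop rest carry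
    let total := (PySem.Int.ofStr? c).getD 0 + r.2
    (PySem.Int.toStr (PySem.Int.mod total 3) :: r.1, PySem.Int.floordiv total 3)

def increment_single_trinary (trinary_str : String) : String :=
  let trinary_chars := trinary_str.toList.map (fun c => String.ofList [c])
  let r := pvALoop trinary_chars 1
  String.join (if r.2 ≠ 0 then "1" :: r.1 else r.1)

-- ===== PORT B =====
-- Horner pass: value = value * 3 + int(ch)
def pvBVal : List Char → Int → Int
  | [], v => v
  | c :: rest, v => pvBVal rest (v * 3 + (PySem.Int.ofStr? (String.ofList [c])).getD 0)

-- render loop: value, r = divmod(value, 3); out.append(str(r))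
def pvBRender : Nat → Int → List String → Int × List String
  | 0, v, out => (v, out)
  | k+1, v, out => pvBRender k (PySem.Int.floordiv v 3) (out ++ [PySem.Int.toStr (PySem.Int.mod v 3)])

def increment_single_trinary_alt (trinary_str : String) : String :=
  let v := pvBVal trinary_str.toList 0 + 1
  let r := pvBRender trinary_str.toList.length v []
  let out := if r.1 ≠ 0 then r.2 ++ ["1"] else r.2
  String.join out.reverse

-- ===== PRECONDITION & SPEC =====
-- Pre_ excludes exactly the strings containing a non-digit character, on which A's int(ch) raises ValueError.
def Pre_increment_single_trinary (trinary_str : String) : Prop :=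
  trinary_str.toList.all Char.isDigit = true
instance (trinary_str : String) : Decidable (Pre_increment_single_trinary trinary_str) := by unfold Pre_increment_single_trinary; infer_instance
def pvWitness_increment_single_trinary : String := "1202"

def Spec_increment_single_trinary (trinary_str : String) (out : String) : Prop := out = increment_single_trinary_alt trinary_str
instance (trinary_str : String) (out : String) : Decidable (Spec_increment_single_trinary trinary_str out) := by unfold Spec_increment_single_trinary; infer_instance

-- ===== CLAIM (what is proved, stated in full; the proofs are below) =====
def Claim_equal_increment_single_trinary : Prop := ∀ (trinary_str : String), Dom_increment_single_trinary trinary_str → Pre_increment_single_trinary trinary_str → Spec_increment_single_trinary trinary_str (increment_single_trinary trinary_str)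

-- ===== LEMMAS AND PROOFS =====

-- digit value of a digit character
def pvDv (c : Char) : Int := (c.toNat : Int) - 48

-- reference: (LSB-first base-3 digit strings of the low k digits of v, leftover after k divisions)
def pvRef : Nat → Int → List String × Int
  | 0, v => ([], v)
  | k+1, v => let r := pvRef k (PySem.Int.floordiv v 3)
              (PySem.Int.toStr (PySem.Int.mod v 3) :: r.1, r.2)

-- MSB-first value of a digit list
def pvMsbVal : List Char → Int
  | [] => 0
  | c :: rest => pvDv c * 3 ^ rest.length + pvMsbVal rest

theorem pv_char_eq_of_toNat {c d : Char} (h : c.toNat = d.toNat) : c = d :=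
  Char.ext (UInt32.toNat_inj.mp h)

theorem pv_ofStr_digit (c : Char) (h : c.isDigit = true) :
    PySem.Int.ofStr? (String.ofList [c]) = some (pvDv c) := by
  have h' : 48 ≤ c.toNat ∧ c.toNat ≤ 57 := by
    simpa [Char.isDigit, UInt32.le_iff_toNat_le] using h
  have hcase : c.toNat = 48 ∨ c.toNat = 49 ∨ c.toNat = 50 ∨ c.toNat = 51 ∨ c.toNat = 52 ∨ c.toNat = 53 ∨ c.toNat = 54 ∨ c.toNat = 55 ∨ c.toNat = 56 ∨ c.toNat = 57 := by omega
  clear h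
  rcases hcase with h|h|h|h|h|h|h|h|h|h
  · rw [pv_char_eq_of_toNat (show c.toNat = '0'.toNat from h)]; decide
  · rw [pv_char_eq_of_toNat (show c.toNat = '1'.toNat from h)]; decide
  · rw [pv_char_eq_of_toNat (show c.toNat = '2'.toNat from h)]; decide
  · rw [pv_char_eq_of_toNat (show c.toNat = '3'.toNat from h)]; decide
  · rw [pv_char_eq_of_toNat (show c.toNat = '4'.toNat from h)]; decide
  · rw [pv_char_eq_of_toNat (show c.toNat = '5'.toNat from h)]; decide
  · rw [pv_char_eq_of_toNat (show c.toNat = '6'.toNat from h)]; decide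
  · rw [pv_char_eq_of_toNat (show c.toNat = '7'.toNat from h)]; decide
  · rw [pv_char_eq_of_toNat (show c.toNat = '8'.toNat from h)]; decide
  · rw [pv_char_eq_of_toNat (show c.toNat = '9'.toNat from h)]; decide

theorem pv_mod_shift (m : Nat) (d W : Int) :
    PySem.Int.mod (d * 3 ^ (m + 1) + W) 3 = PySem.Int.mod W 3 := by
  rw [PySem.Int.mod_eq_emod_of_pos (by norm_num : (0:Int) < 3), PySem.Int.mod_eq_emod_of_pos (by norm_num : (0:Int) < 3)]
  have heq : d * 3 ^ (m + 1) + W = W + (d * 3 ^ m) * 3 := by ring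
  rw [heq]
  generalize d * 3 ^ m = X
  omega

theorem pv_fdiv_shift (m : Nat) (d W : Int) :
    PySem.Int.floordiv (d * 3 ^ (m + 1) + W) 3 = d * 3 ^ m + PySem.Int.floordiv W 3 := by
  rw [PySem.Int.floordiv_eq_ediv_of_pos (by norm_num : (0:Int) < 3), PySem.Int.floordiv_eq_ediv_of_pos (by norm_num : (0:Int) < 3)]
  have heq : d * 3 ^ (m + 1) + W = W + (d * 3 ^ m) * 3 := by ring
  rw [heq]
  generalize d * 3 ^ m = X
  omega

-- peeling the TOP digit off the reference rendering
theorem pvRef_top (m : Nat) (d W : Int) :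
    pvRef (m + 1) (d * 3 ^ m + W) =
      ((pvRef m W).1 ++ [PySem.Int.toStr (PySem.Int.mod (d + (pvRef m W).2) 3)],
       PySem.Int.floordiv (d + (pvRef m W).2) 3) := by
  induction m generalizing d W with
  | zero => simp [pvRef, pow_zero, mul_one]
  | succ m ih =>
    show pvRef (m + 2) (d * 3 ^ (m + 1) + W) = _
    rw [pvRef]
    rw [pv_fdiv_shift, pv_mod_shift, ih]
    simp [pvRef]

theorem pvALoop_spec (cs : List Char) (carry : Int)
    (h : ∀ c ∈ cs, c.isDigit = true) :
    pvALoop (cs.map (fun c => String.ofList [c])) carry =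
      ((pvRef cs.length (pvMsbVal cs + carry)).1.reverse,
       (pvRef cs.length (pvMsbVal cs + carry)).2) := by
  induction cs with
  | nil => simp [pvALoop, pvRef, pvMsbVal]
  | cons c rest ih =>
    have hd : c.isDigit = true := h c (List.mem_cons_self ..)
    have hrest := ih (fun x hx => h x (List.mem_cons_of_mem _ hx))
    have hval : pvMsbVal (c :: rest) + carry = pvDv c * 3 ^ rest.length + (pvMsbVal rest + carry) := by
      simp [pvMsbVal]; ring
    rw [List.map_cons, pvALoop, hrest, pv_ofStr_digit c hd]
    simp only [List.length_cons, hval, pvRef_top, Option.getD_some]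
    simp

theorem pvBVal_spec (cs : List Char) (v : Int)
    (h : ∀ c ∈ cs, c.isDigit = true) :
    pvBVal cs v = v * 3 ^ cs.length + pvMsbVal cs := by
  induction cs generalizing v with
  | nil => simp [pvBVal, pvMsbVal]
  | cons c rest ih =>
    have hd : c.isDigit = true := h c (List.mem_cons_self ..)
    rw [pvBVal, pv_ofStr_digit c hd, ih _ (fun x hx => h x (List.mem_cons_of_mem _ hx))]
    simp [pvMsbVal]; ring

theorem pvBRender_spec (k : Nat) (v : Int) (out : List String) :
    pvBRender k v out = ((pvRef k v).2, out ++ (pvRef k v).1) := by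
  induction k generalizing v out with
  | zero => simp [pvBRender, pvRef]
  | succ k ih => rw [pvBRender, ih]; simp [pvRef]

-- ===== VERDICT (by name: the statement is the Claim_ definition above) =====
theorem increment_single_trinary_spec : Claim_equal_increment_single_trinary := by
  intro s _ hpre
  rw [Pre_increment_single_trinary, List.all_eq_true] at hpre
  unfold Spec_increment_single_trinary increment_single_trinary increment_single_trinary_alt
  simp only []
  rw [pvALoop_spec s.toList 1 hpre, pvBVal_spec s.toList 0 hpre, pvBRender_spec]
  simp only [zero_mul, zero_add]
  by_cases hc : (pvRef s.toList.length (pvMsbVal s.toList + 1)).2 = 0 <;>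
    simp only [String.length_toList] at hc <;> simp [hc]
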